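-- pv_equiv track=rewrite | github.com/geometrian/QualityCpp | rules/_debrace.py | str_first
-- ===== SOURCE A (Python) =====
-- def str_first(string):
--     result = []
--     current = ""
--     counter = 0
--     for c in string:
--         if c == "{":
--             if counter == 0:
--                 if len(current) > 0:
--                     result.append(current)
--                     current = ""
--             counter += 1
--             current += "{"
--         elif c == "}":
--             assert counter >= 1
--             if counter == 1:
--                 if len(current) > 0:
--                     result.append(current+"}")
--                     current = ""
--             else:
--                 current += "}"
--             counter -= 1
--         else:
--             current += c
--     if len(current) > 0:
--         result.append(current)
--     return result
-- ===== SOURCE B (Python) =====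
-- def str_first(string):
--     segments = []
--     text = ""
--     i = 0
--     n = len(string)
--     while i < n:
--         c = string[i]
--         if c == "{":
--             if text:
--                 segments.append(text)
--                 text = ""
--             seg = ""
--             depth = 0
--             while i < n:
--                 ch = string[i]
--                 seg += ch
--                 i += 1
--                 if ch == "{":
--                     depth += 1
--                 elif ch == "}":
--                     depth -= 1
--                     if depth == 0:
--                         break
--             segments.append(seg)
--         elif c == "}":
--             raise AssertionError
--         else:
--             text += c
--             i += 1
--     if text:
--         segments.append(text)
--     return segments
-- ===== Notes on version B (the rewrite author's own statement) =====
-- stated objective: alternative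
-- what changed: A threads one counter-driven state machine through a single fold with conditional flushes; B walks a cursor with an outer plain-text scan and a separate inner depth-counting scan that slices out each whole balanced brace group, flushing the text buffer around it.
-- outside the precondition, e.g. on str_first('}'): A raises AssertionError, B raises AssertionError; on str_first('a}b'): A raises AssertionError, B raises AssertionError
import Mathlib
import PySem

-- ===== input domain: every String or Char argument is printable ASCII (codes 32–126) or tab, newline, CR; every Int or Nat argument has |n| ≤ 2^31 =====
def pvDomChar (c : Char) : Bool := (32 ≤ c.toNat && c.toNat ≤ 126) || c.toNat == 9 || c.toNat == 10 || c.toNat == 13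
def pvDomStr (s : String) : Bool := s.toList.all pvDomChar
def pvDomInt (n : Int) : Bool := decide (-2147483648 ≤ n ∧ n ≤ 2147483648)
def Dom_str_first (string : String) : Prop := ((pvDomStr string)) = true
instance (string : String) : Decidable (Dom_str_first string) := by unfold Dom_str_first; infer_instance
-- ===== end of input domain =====

-- B re-decomposes A's single counter-driven pass into an outer text scan with an inner
-- balanced-group scan (objective: alternative); same return value wherever A returns.

-- ===== PORT A =====
-- one fold step of A's for-loop; state = (result, current, counter)
def stepA (st : List String × List Char × Int) (c : Char) : List String × List Char × Int :=
  match st with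
  | (result, current, counter) =>
    if c = '{' then
      if counter = 0 then
        if current.length > 0 then (result ++ [String.ofList current], ['{'], counter + 1)
        else (result, current ++ ['{'], counter + 1)
      else (result, current ++ ['{'], counter + 1)
    else if c = '}' then
      -- Python asserts counter ≥ 1 here; Pre_ excludes the failing inputs
      if counter = 1 then
        if current.length > 0 then (result ++ [String.ofList (current ++ ['}'])], [], counter - 1)
        else (result, current, counter - 1)
      else (result, current ++ ['}'], counter - 1)
    else (result, current ++ [c], counter)

def str_first (string : String) : List String :=
  let st := string.toList.foldl stepA ([], [], 0)
  st.1 ++ (if st.2.1.length > 0 then [String.ofList st.2.1] else [])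

-- ===== PORT B =====
-- inner scan of B: consume the balanced group into seg (depth-counting); returns (seg, rest)
def grabB : List Char → Int → List Char → List Char × List Char
  | [], _, seg => (seg, [])
  | ch :: rest, depth, seg =>
    if ch = '{' then grabB rest (depth + 1) (seg ++ [ch])
    else if ch = '}' then
      if depth - 1 = 0 then (seg ++ [ch], rest)
      else grabB rest (depth - 1) (seg ++ [ch])
    else grabB rest depth (seg ++ [ch])

theorem grabB_rest_le : ∀ (cs : List Char) (d : Int) (seg : List Char),
    (grabB cs d seg).2.length ≤ cs.length := by
  intro cs
  induction cs with
  | nil => intro d seg; simp [grabB]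
  | cons ch rest ih =>
    intro d seg
    simp only [grabB]
    split_ifs with h1 h2 h3
    · exact Nat.le_succ_of_le (ih _ _)
    · simp
    · exact Nat.le_succ_of_le (ih _ _)
    · exact Nat.le_succ_of_le (ih _ _)

-- outer loop of B: plain chars go into text; a '{' flushes text and slices out a whole group
def outerB : List Char → List Char → List String → List String
  | [], text, segments => segments ++ (if text = [] then [] else [String.ofList text])
  | c :: rest, text, segments =>
    if _h : c = '{' then
      let g := grabB (c :: rest) 0 []
      outerB g.2 [] ((segments ++ (if text = [] then [] else [String.ofList text])) ++ [String.ofList g.1])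
    else if c = '}' then
      segments  -- Python B raises AssertionError here (outside Pre_)
    else outerB rest (text ++ [c]) segments
termination_by cs _ _ => cs.length
decreasing_by
  · simp only [grabB, _h, if_pos]
    exact Nat.lt_succ_of_le (grabB_rest_le _ _ _)
  · simp

def str_first_alt (string : String) : List String := outerB string.toList [] []

-- ===== PRECONDITION & SPEC =====
-- the running brace depth starting from d never goes negative
def okD (cs : List Char) (d : Nat) : Prop :=
  ∀ p ∈ cs.inits, p.count '}' ≤ d + p.count '{'

-- Pre_ excludes exactly the strings with a top-level '}' (some prefix has more '}' than '{'),
-- on which A's `assert counter >= 1` raises AssertionError (B raises there too).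
def Pre_str_first (string : String) : Prop := okD string.toList 0
instance (string : String) : Decidable (Pre_str_first string) := by
  unfold Pre_str_first okD; infer_instance

def pvWitness_str_first : String := "a{b{c}d}e{f"

def Spec_str_first (string : String) (out : List String) : Prop := out = str_first_alt string
instance (string : String) (out : List String) : Decidable (Spec_str_first string out) := by
  unfold Spec_str_first; infer_instance

-- ===== CLAIM (what is proved, stated in full; the proofs are below) =====
def Claim_equal_str_first : Prop := ∀ (string : String), Dom_str_first string → Pre_str_first string → Spec_str_first string (str_first string)

-- ===== LEMMAS AND PROOFS =====

def finishA (st : List String × List Char × Int) : List String :=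
  st.1 ++ (if st.2.1.length > 0 then [String.ofList st.2.1] else [])

theorem okD_head {c : Char} {rest : List Char} {d : Nat} (h : okD (c :: rest) d) :
    List.count '}' [c] ≤ d + List.count '{' [c] :=
  h [c] (by
    rw [List.mem_inits]
    exact ⟨rest, rfl⟩)

theorem okD_tail {c : Char} {rest : List Char} {d d' : Nat} (h : okD (c :: rest) d)
    (hd : ∀ p : List Char, p.count '}' + (if c = '}' then 1 else 0) ≤ d + (p.count '{' + (if c = '{' then 1 else 0)) → p.count '}' ≤ d' + p.count '{') :
    okD rest d' := by
  intro p hp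
  have := h (c :: p) (by
    rw [List.mem_inits] at hp ⊢
    obtain ⟨t, ht⟩ := hp
    exact ⟨t, by simp [ht]⟩)
  simp only [List.count_cons, beq_iff_eq] at this
  exact hd p this

theorem main_lemma : ∀ (cs : List Char),
    (∀ (segments : List String) (text : List Char), okD cs 0 →
      finishA (cs.foldl stepA (segments, text, 0)) = outerB cs text segments)
    ∧ (∀ (segments : List String) (seg : List Char) (d : Nat), 1 ≤ d → okD cs d → seg ≠ [] →
      finishA (cs.foldl stepA (segments, seg, (d : Int))) =
        outerB (grabB cs (d : Int) seg).2 [] (segments ++ [String.ofList (grabB cs (d : Int) seg).1])) := by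
  intro cs
  induction cs with
  | nil =>
    constructor
    · intro segments text _
      simp [finishA, outerB, List.length_pos_iff]
    · intro segments seg d _ _ hs
      simp [finishA, grabB, outerB, List.length_pos_iff, hs]
  | cons c rest ih =>
    constructor
    · intro segments text hok
      by_cases h1 : c = '{'
      · subst h1
        have hrec := ih.2 (segments ++ (if text = [] then [] else [String.ofList text])) ['{'] 1
          (le_refl 1)
          (okD_tail hok (by intro p hp; simp at hp ⊢; omega))
          (by simp)
        simp only [Nat.cast_one] at hrec
        have hstep : stepA (segments, text, (0 : Int)) '{' =
            (segments ++ (if text = [] then [] else [String.ofList text]), ['{'], (1 : Int)) := by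
          by_cases ht : text = []
          · simp [stepA, ht]
          · simp [stepA, ht, List.length_pos_iff]
        have hg : grabB ('{' :: rest) 0 [] = grabB rest 1 ['{'] := by
          simp [grabB]
        simp only [List.foldl_cons]
        rw [hstep, hrec]
        simp only [outerB, hg]
        simp
      · by_cases h2 : c = '}'
        · exfalso
          have := okD_head hok
          simp [h2] at this
        · have hrec := ih.1 segments (text ++ [c])
            (okD_tail hok (by intro p hp; simp [h1, h2] at hp ⊢; omega))
          simp only [List.foldl_cons]
          have hstep : stepA (segments, text, (0 : Int)) c = (segments, text ++ [c], (0 : Int)) := by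
            simp [stepA, h1, h2]
          rw [hstep, hrec]
          rw [outerB]
          simp [h1, h2]
    · intro segments seg d hd hok hs
      by_cases h1 : c = '{'
      · subst h1
        have hrec := ih.2 segments (seg ++ ['{']) (d + 1) (by omega)
          (okD_tail hok (by intro p hp; simp at hp ⊢; omega))
          (by simp)
        have hstep : stepA (segments, seg, (d : Int)) '{' = (segments, seg ++ ['{'], ((d : Int) + 1)) := by
          simp [stepA]
          intro h0
          exact absurd h0 (by omega)
        have hcast : (d : Int) + 1 = ((d + 1 : Nat) : Int) := by push_cast; ring
        have hg : grabB ('{' :: rest) (d : Int) seg = grabB rest ((d : Int) + 1) (seg ++ ['{']) := by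
          simp [grabB]
        simp only [List.foldl_cons]
        rw [hstep, hg, hcast]
        exact hrec
      · by_cases h2 : c = '}'
        · subst h2
          by_cases hd1 : d = 1
          · subst hd1
            have hrec := ih.1 (segments ++ [String.ofList (seg ++ ['}'])]) []
              (okD_tail hok (by intro p hp; simp at hp ⊢; omega))
            have hstep : stepA (segments, seg, (1 : Int)) '}' =
                (segments ++ [String.ofList (seg ++ ['}'])], [], (0 : Int)) := by
              have hlen : seg.length > 0 := List.length_pos_iff.mpr hs
              simp [stepA, hlen]
            have hg : grabB ('}' :: rest) (1 : Int) seg = (seg ++ ['}'], rest) := by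
              simp [grabB]
            simp only [List.foldl_cons, Nat.cast_one]
            rw [hstep, hrec, hg]
          · have hrec := ih.2 segments (seg ++ ['}']) (d - 1) (by omega)
              (okD_tail hok (by intro p hp; simp at hp ⊢; omega))
              (by simp)
            have hne : (d : Int) - 1 ≠ 0 := by omega
            have hd1' : (d : Int) ≠ 1 := by omega
            have hstep : stepA (segments, seg, (d : Int)) '}' =
                (segments, seg ++ ['}'], ((d : Int) - 1)) := by
              simp [stepA, hd1']
            have hcast : (d : Int) - 1 = ((d - 1 : Nat) : Int) := by omega
            have hg : grabB ('}' :: rest) (d : Int) seg = grabB rest ((d : Int) - 1) (seg ++ ['}']) := by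
              simp [grabB, hne]
            simp only [List.foldl_cons]
            rw [hstep, hg, hcast]
            exact hrec
        · have hrec := ih.2 segments (seg ++ [c]) d hd
            (okD_tail hok (by intro p hp; simp [h1, h2] at hp ⊢; omega))
            (by simp)
          have hstep : stepA (segments, seg, (d : Int)) c = (segments, seg ++ [c], (d : Int)) := by
            simp [stepA, h1, h2]
          have hg : grabB (c :: rest) (d : Int) seg = grabB rest (d : Int) (seg ++ [c]) := by
            simp [grabB, h1, h2]
          simp only [List.foldl_cons]
          rw [hstep, hg]
          exact hrec

-- ===== VERDICT (by name: the statement is the Claim_ definition above) =====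
theorem str_first_spec : Claim_equal_str_first := by
  intro string _ hpre
  unfold Spec_str_first str_first str_first_alt
  exact (main_lemma string.toList).1 [] [] hpre
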